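-- pv_equiv track=rewrite | github.com/flyshadow-a/shiyou | pages/output_special_strategy/report_jinja2_generator.py | aggregate_inspection_counts
-- ===== SOURCE A (Python) =====
-- from typing import Any
--
-- INSPECTION_LEVEL_ORDER = ["II", "III", "IV"]
--
-- def to_text(value: Any) -> str:
--     if value is None:
--         return ""
--     if isinstance(value, float):
--         return f"{value:.2f}"
--     return str(value).strip()
--
-- def aggregate_inspection_counts(rows: list[dict[str, Any]], risk_value: str, risk_key: str) -> dict[str, int]:
--     counts = {k: 0 for k in INSPECTION_LEVEL_ORDER}
--     for row in rows:
--         if to_text(row.get(risk_key)) != risk_value: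
--             continue
--         level = to_text(row.get("inspect_level"))
--         if level in counts:
--             counts[level] += 1
--     return counts
-- ===== SOURCE B (Python) =====
-- from typing import Any
--
-- INSPECTION_LEVEL_ORDER = ["II", "III", "IV"]
--
-- def to_text(value: Any) -> str:
--     if value is None:
--         return ""
--     if isinstance(value, float):
--         return f"{value:.2f}"
--     return str(value).strip()
--
-- def _matches(row: dict[str, Any], risk_value: str, risk_key: str, level: str) -> bool:
--     return to_text(row.get(risk_key)) == risk_value and to_text(row.get("inspect_level")) == level
--
-- def aggregate_inspection_counts(rows: list[dict[str, Any]], risk_value: str, risk_key: str) -> dict[str, int]: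
--     return {
--         level: sum(1 for row in rows if _matches(row, risk_value, risk_key, level))
--         for level in INSPECTION_LEVEL_ORDER
--     }
-- ===== Notes on version B (the rewrite author's own statement) =====
-- stated objective: idiomatic
-- what changed: Replaced A's single accumulating loop over rows that updates a pre-initialised counts dict with a dict comprehension keyed over INSPECTION_LEVEL_ORDER, one independent filtered scan of rows per level.
import Mathlib
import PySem

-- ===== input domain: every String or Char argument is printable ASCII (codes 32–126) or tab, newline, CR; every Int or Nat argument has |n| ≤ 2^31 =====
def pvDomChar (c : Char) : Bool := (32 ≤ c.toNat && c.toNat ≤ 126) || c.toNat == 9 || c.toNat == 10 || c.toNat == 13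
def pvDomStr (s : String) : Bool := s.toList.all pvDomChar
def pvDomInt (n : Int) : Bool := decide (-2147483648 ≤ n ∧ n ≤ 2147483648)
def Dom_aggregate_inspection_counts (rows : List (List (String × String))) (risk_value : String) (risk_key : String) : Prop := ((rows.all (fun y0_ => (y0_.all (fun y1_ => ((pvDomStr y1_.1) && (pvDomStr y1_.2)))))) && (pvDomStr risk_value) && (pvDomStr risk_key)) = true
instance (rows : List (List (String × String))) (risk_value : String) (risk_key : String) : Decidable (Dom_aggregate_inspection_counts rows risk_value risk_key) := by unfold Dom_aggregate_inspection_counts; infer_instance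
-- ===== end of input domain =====

-- B replaces A's single accumulating loop over a pre-initialised counts dict with one
-- independent filtered count of rows per inspection level (idiomatic dict comprehension).

-- ===== PORT A =====
-- shared module constant
def INSPECTION_LEVEL_ORDER : List String := ["II", "III", "IV"]

-- row.get(k): first-match lookup in the association list (Python dict.get, None when absent)
def pvGet (row : List (String × String)) (k : String) : Option String :=
  match row with
  | [] => none
  | (k', v) :: rest => if k' == k then some v else pvGet rest k

-- to_text: on String-valued rows only the None branch and str(value).strip() are reachable
def pvToText (v : Option String) : String :=
  match v with
  | none => ""
  | some s => PySem.Str.strip s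

def aggregate_inspection_counts (rows : List (List (String × String))) (risk_value : String) (risk_key : String) : List (String × Int) :=
  let counts : PySem.Dict String Int :=
    INSPECTION_LEVEL_ORDER.foldl (fun d k => d.insert k 0) PySem.Dict.empty
  let counts :=
    rows.foldl (fun counts row =>
      if pvToText (pvGet row risk_key) != risk_value then counts
      else
        let level := pvToText (pvGet row "inspect_level")
        if counts.contains level then counts.modify level 0 (· + 1) else counts)
      counts
  counts.items

-- ===== PORT B =====
-- _matches(row, risk_value, risk_key, level) from Source B
def pvMatches (row : List (String × String)) (risk_value risk_key level : String) : Bool :=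
  pvToText (pvGet row risk_key) == risk_value
    && pvToText (pvGet row "inspect_level") == level

def aggregate_inspection_counts_alt (rows : List (List (String × String))) (risk_value : String) (risk_key : String) : List (String × Int) :=
  INSPECTION_LEVEL_ORDER.map (fun level =>
    (level,
      rows.foldl (fun acc row =>
        if pvMatches row risk_value risk_key level then acc + 1 else acc) (0 : Int)))

-- ===== PRECONDITION & SPEC =====
def Spec_aggregate_inspection_counts (rows : List (List (String × String))) (risk_value : String) (risk_key : String) (out : List (String × Int)) : Prop := out = aggregate_inspection_counts_alt rows risk_value risk_key
instance (rows : List (List (String × String))) (risk_value : String) (risk_key : String) (out : List (String × Int)) : Decidable (Spec_aggregate_inspection_counts rows risk_value risk_key out) := by unfold Spec_aggregate_inspection_counts; infer_instance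

-- ===== CLAIM (what is proved, stated in full; the proofs are below) =====
def Claim_equal_aggregate_inspection_counts : Prop := ∀ (rows : List (List (String × String))) (risk_value : String) (risk_key : String), Dom_aggregate_inspection_counts rows risk_value risk_key → Spec_aggregate_inspection_counts rows risk_value risk_key (aggregate_inspection_counts rows risk_value risk_key)

-- ===== LEMMAS AND PROOFS =====

-- one step of A's loop on a counts dict of the fixed shape adds the 0/1 match indicator per level
lemma stepA (risk_value risk_key : String) (row : List (String × String)) (a b c : Int) :
    (if pvToText (pvGet row risk_key) != risk_value then
        (PySem.Dict.mk [("II", a), ("III", b), ("IV", c)])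
      else
        let level := pvToText (pvGet row "inspect_level")
        if (PySem.Dict.mk [("II", a), ("III", b), ("IV", c)]).contains level then
          (PySem.Dict.mk [("II", a), ("III", b), ("IV", c)]).modify level 0 (· + 1)
        else (PySem.Dict.mk [("II", a), ("III", b), ("IV", c)]))
    = PySem.Dict.mk
        [("II", a + if pvMatches row risk_value risk_key "II" then 1 else 0),
         ("III", b + if pvMatches row risk_value risk_key "III" then 1 else 0),
         ("IV", c + if pvMatches row risk_value risk_key "IV" then 1 else 0)] := by
  by_cases hr : pvToText (pvGet row risk_key) = risk_value
  · by_cases h2 : pvToText (pvGet row "inspect_level") = "II"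
    · simp [pvMatches, hr, h2, PySem.Dict.contains, PySem.Dict.modify, PySem.Dict.getD,
        PySem.Dict.get?, PySem.Dict.insert]
    · by_cases h3 : pvToText (pvGet row "inspect_level") = "III"
      · simp [pvMatches, hr, h3, PySem.Dict.contains, PySem.Dict.modify, PySem.Dict.getD,
          PySem.Dict.get?, PySem.Dict.insert]
      · by_cases h4 : pvToText (pvGet row "inspect_level") = "IV"
        · simp [pvMatches, hr, h4, PySem.Dict.contains, PySem.Dict.modify,
            PySem.Dict.getD, PySem.Dict.get?, PySem.Dict.insert]
        · have h2' := Ne.symm h2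
          have h3' := Ne.symm h3
          have h4' := Ne.symm h4
          simp [pvMatches, hr, h2', h3', h4', PySem.Dict.contains]
          exact ⟨h2, h3, h4⟩
  · simp [pvMatches, hr]

-- loop invariant for A's fold: starting from counts {"II": a, "III": b, "IV": c},
-- the loop adds the number of rows matching each level
lemma loopA_inv (risk_value risk_key : String) (rows : List (List (String × String)))
    (a b c : Int) :
    rows.foldl (fun counts row =>
      if pvToText (pvGet row risk_key) != risk_value then counts
      else
        let level := pvToText (pvGet row "inspect_level")
        if counts.contains level then counts.modify level 0 (· + 1) else counts)
      (PySem.Dict.mk [("II", a), ("III", b), ("IV", c)])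
    = PySem.Dict.mk
        [("II", a + rows.countP (fun row => pvMatches row risk_value risk_key "II")),
         ("III", b + rows.countP (fun row => pvMatches row risk_value risk_key "III")),
         ("IV", c + rows.countP (fun row => pvMatches row risk_value risk_key "IV"))] := by
  induction rows generalizing a b c with
  | nil => simp
  | cons row rest ih =>
    rw [List.foldl_cons]
    show List.foldl _ (if pvToText (pvGet row risk_key) != risk_value then _ else _) rest = _
    rw [stepA risk_value risk_key row a b c, ih]
    apply PySem.Dict.ext
    simp only [List.countP_cons, List.cons.injEq, Prod.mk.injEq, true_and, and_true]
    push_cast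
    refine ⟨?_, ?_, ?_⟩ <;> ring

-- ===== VERDICT (by name: the statement is the Claim_ definition above) =====
theorem aggregate_inspection_counts_spec : Claim_equal_aggregate_inspection_counts := by
  intro rows risk_value risk_key _
  unfold Spec_aggregate_inspection_counts aggregate_inspection_counts aggregate_inspection_counts_alt
  have h0 : INSPECTION_LEVEL_ORDER.foldl (fun d k => d.insert k 0) PySem.Dict.empty
      = PySem.Dict.mk [("II", (0 : Int)), ("III", 0), ("IV", 0)] := by decide
  simp only [h0, loopA_inv risk_value risk_key rows 0 0 0]
  have hB : ∀ level : String,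
      rows.foldl (fun acc row =>
        if pvMatches row risk_value risk_key level then acc + 1 else acc) (0 : Int)
      = (0 : Int) + rows.countP (fun row => pvMatches row risk_value risk_key level) :=
    fun level => PySem.List.foldl_count_if _ rows 0
  simp [INSPECTION_LEVEL_ORDER, hB]
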